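-- pv_equiv track=rewrite | github.com/nicbencini/launch_school | exercises/py110_small_problems/medium_2/pairs_2.py | check_for_pairs
-- ===== SOURCE A (Python) =====
-- def check_for_pairs(indices_list):
--
--     indices_list = indices_list.copy()
--
--     pair_count = 0
--
--     while len(indices_list) >= 2:
--
--
--
--         if indices_list[0] + 1 == indices_list[1] and len(indices_list) >= 3:
--             indices_list.pop(0)
--             indices_list.pop(1)
--         else:
--             indices_list.pop(0)
--             indices_list.pop(0)
--
--         pair_count += 1
--
--     return pair_count
-- ===== SOURCE B (Python) =====
-- def check_for_pairs(indices_list):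
--     # Each iteration of the original loop removes exactly two elements,
--     # so the number of iterations is just len // 2.
--     return len(indices_list) // 2
-- ===== Notes on version B (the rewrite author's own statement) =====
-- stated objective: faster
-- what changed: Every iteration of A's while-loop removes exactly two elements whichever branch runs, so the pair count is simply len(indices_list)//2; B replaces the pop(0) simulation with that closed form.
import Mathlib
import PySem

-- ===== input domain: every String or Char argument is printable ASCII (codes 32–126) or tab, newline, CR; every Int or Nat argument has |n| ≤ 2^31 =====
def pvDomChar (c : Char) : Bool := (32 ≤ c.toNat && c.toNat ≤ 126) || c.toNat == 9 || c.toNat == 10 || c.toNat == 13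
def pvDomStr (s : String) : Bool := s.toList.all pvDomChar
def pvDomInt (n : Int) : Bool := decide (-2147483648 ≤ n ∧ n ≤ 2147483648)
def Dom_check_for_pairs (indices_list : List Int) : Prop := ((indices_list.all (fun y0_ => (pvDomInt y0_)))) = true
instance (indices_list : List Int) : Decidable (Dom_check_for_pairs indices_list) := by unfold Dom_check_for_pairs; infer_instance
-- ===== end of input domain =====

-- B replaces A's quadratic pop(0) simulation with the closed form len//2
-- (each loop iteration of A removes exactly two elements, so the count is len//2).


-- ===== PORT A =====
-- the while-loop: state is (remaining list, pair_count); the two branches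
-- are 'pop(0); pop(1)' (when l[0]+1 == l[1] and len ≥ 3) and 'pop(0); pop(0)'
def check_for_pairs_loop : List Int → Int → Int
  | a :: b :: rest, pair_count =>
      if a + 1 = b ∧ rest ≠ [] then
        -- pop(0) removes a; pop(1) then removes the element after b
        check_for_pairs_loop (b :: rest.drop 1) (pair_count + 1)
      else
        -- pop(0); pop(0): removes a and b
        check_for_pairs_loop rest (pair_count + 1)
  | [], pair_count => pair_count
  | [_], pair_count => pair_count
termination_by l _ => l.length
decreasing_by
  all_goals (simp only [List.length_cons, List.length_drop]; omega)

def check_for_pairs (indices_list : List Int) : Int :=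
  check_for_pairs_loop indices_list 0

-- ===== PORT B =====
def check_for_pairs_alt (indices_list : List Int) : Int :=
  PySem.Int.floordiv (Int.ofNat indices_list.length) 2

-- ===== PRECONDITION & SPEC =====
def Spec_check_for_pairs (indices_list : List Int) (out : Int) : Prop := out = check_for_pairs_alt indices_list
instance (indices_list : List Int) (out : Int) : Decidable (Spec_check_for_pairs indices_list out) := by unfold Spec_check_for_pairs; infer_instance

-- ===== CLAIM (what is proved, stated in full; the proofs are below) =====
def Claim_equal_check_for_pairs : Prop := ∀ (indices_list : List Int), Dom_check_for_pairs indices_list → Spec_check_for_pairs indices_list (check_for_pairs indices_list)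

-- ===== LEMMAS AND PROOFS =====

-- loop invariant: the loop adds ⌊length/2⌋ to the accumulator
theorem check_for_pairs_loop_eq (l : List Int) (c : Int) :
    check_for_pairs_loop l c = c + ((l.length / 2 : Nat) : Int) := by
  fun_induction check_for_pairs_loop l c with
  | case1 a b rest c h ih =>
      rw [ih]
      have hr : rest ≠ [] := h.2
      have : (b :: rest.drop 1).length = rest.length := by
        simp
        cases rest with
        | nil => exact absurd rfl hr
        | cons x xs => simp
      rw [this]
      have h2 : (a :: b :: rest).length = rest.length + 2 := by simp
      rw [h2]
      push_cast
      omega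
  | case2 a b rest c h ih =>
      rw [ih]
      have h2 : (a :: b :: rest).length = rest.length + 2 := by simp
      rw [h2]
      push_cast
      omega
  | case3 c => simp
  | case4 a c => simp

-- ===== VERDICT (by name: the statement is the Claim_ definition above) =====
theorem check_for_pairs_spec : Claim_equal_check_for_pairs := by
  intro l _
  unfold Spec_check_for_pairs check_for_pairs check_for_pairs_alt
  rw [check_for_pairs_loop_eq]
  rw [show Int.ofNat l.length = ((l.length : Nat) : Int) from rfl,
      show (2 : Int) = ((2 : Nat) : Int) from rfl,
      PySem.Int.floordiv_natCast l.length 2]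
  simp
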